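-- pv_equiv track=rewrite | github.com/wwwwodddd/Zukunft | cses/1722.py | F
-- ===== SOURCE A (Python) =====
-- p = 1000000007
--
-- def mul(a, b):
-- 	return [(a[0] * b[0] + a[1] * b[1]) % p, (a[1] * b[0] + a[0] * b[1] + a[1] * b[1]) % p]
--
-- def F(n):
-- 	if n == 0:
-- 		return [1, 0]
-- 	elif n & 1:
-- 		a = F(n - 1)
-- 		return mul(a, [0, 1])
-- 	else:
-- 		a = F(n // 2)
-- 		return mul(a, a)
-- ===== SOURCE B (Python) =====
-- p = 1000000007
--
-- def mul(a, b):
-- 	return [(a[0] * b[0] + a[1] * b[1]) % p, (a[1] * b[0] + a[0] * b[1] + a[1] * b[1]) % p]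
--
-- def F(n):
-- 	result = [1, 0]
-- 	base = [0, 1]
-- 	while n > 0:
-- 		if n & 1:
-- 			result = mul(result, base)
-- 		base = mul(base, base)
-- 		n >>= 1
-- 	return result
-- ===== Notes on version B (the rewrite author's own statement) =====
-- stated objective: alternative
-- what changed: Replaces the top-down recursion on n (peel a bit with F(n-1), square with F(n//2)) by an iterative bottom-up binary exponentiation that scans the bits of n in a while loop, accumulating result and squaring base; mul is unchanged.
import Mathlib
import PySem

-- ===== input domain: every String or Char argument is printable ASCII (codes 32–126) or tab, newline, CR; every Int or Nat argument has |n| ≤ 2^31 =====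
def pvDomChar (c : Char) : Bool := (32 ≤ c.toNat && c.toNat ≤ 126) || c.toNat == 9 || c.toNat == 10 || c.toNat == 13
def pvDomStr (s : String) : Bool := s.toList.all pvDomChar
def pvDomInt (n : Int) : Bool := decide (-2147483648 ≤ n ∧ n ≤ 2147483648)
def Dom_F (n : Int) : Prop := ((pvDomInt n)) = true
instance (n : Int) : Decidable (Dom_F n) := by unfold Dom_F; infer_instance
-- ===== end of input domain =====

-- B is an iterative binary exponentiation over the bits of n instead of A's top-down
-- recursion; same mul helper, same values. Equivalence is about the return value on n ≥ 0.

-- ===== PORT A =====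
def pconst : Int := 1000000007

-- port of the module-level helper `mul`; exact on length-≥2 lists (all call sites pass
-- two-element literals or mul results), via getD with an unreachable default.
def mulM (a b : List Int) : List Int :=
  [(a.getD 0 0 * b.getD 0 0 + a.getD 1 0 * b.getD 1 0) % pconst,
   (a.getD 1 0 * b.getD 0 0 + a.getD 0 0 * b.getD 1 0 + a.getD 1 0 * b.getD 1 0) % pconst]

-- A's recursion, on the Nat image of n (Python diverges for n < 0; Pre_F excludes those)
def FA (m : Nat) : List Int :=
  if m = 0 then [1, 0]
  else if m % 2 = 1 then mulM (FA (m - 1)) [0, 1]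
  else
    let a := FA (m / 2)
    mulM a a
  decreasing_by all_goals omega

def F (n : Int) : List Int := FA n.toNat

-- ===== PORT B =====
-- Source B's while loop: state (result, base), n halved each step
def FB (m : Nat) (result base : List Int) : List Int :=
  if m = 0 then result
  else FB (m / 2) (if m % 2 = 1 then mulM result base else result) (mulM base base)
  decreasing_by omega

def F_alt (n : Int) : List Int := FB n.toNat [1, 0] [0, 1]

-- ===== PRECONDITION & SPEC =====
-- Pre_F excludes n < 0, where the Python A recurses without a base case (RecursionError).
def Pre_F (n : Int) : Prop := 0 ≤ n
instance (n : Int) : Decidable (Pre_F n) := by unfold Pre_F; infer_instance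
def pvWitness_F : Int := 10

def Spec_F (n : Int) (out : List Int) : Prop := out = F_alt n
instance (n : Int) (out : List Int) : Decidable (Spec_F n out) := by unfold Spec_F; infer_instance

-- ===== CLAIM (what is proved, stated in full; the proofs are below) =====
def Claim_equal_F : Prop := ∀ (n : Int), Dom_F n → Pre_F n → Spec_F n (F n)
-- ===== LEMMAS AND PROOFS =====

-- Abstraction: a two-element list as a pair over ZMod p, where mulM becomes a total
-- multiplication (multiplication in Z[x]/(x² − x − 1) mod p) with no reductions to track.
def P : Nat := 1000000007

def phi (l : List Int) : ZMod P × ZMod P := ((l.getD 0 0 : Int), (l.getD 1 0 : Int))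

def mulZ (a b : ZMod P × ZMod P) : ZMod P × ZMod P :=
  (a.1 * b.1 + a.2 * b.2, a.2 * b.1 + a.1 * b.2 + a.2 * b.2)

-- powers of an arbitrary base under mulZ
def gpw : Nat → ZMod P × ZMod P → ZMod P × ZMod P
  | 0, _ => (1, 0)
  | m + 1, x => mulZ (gpw m x) x

lemma pconst_cast : ((P : Int)) = pconst := by decide

lemma phi_mulM (a b : List Int) : phi (mulM a b) = mulZ (phi a) (phi b) := by
  simp only [phi, mulM, mulZ, List.getD, List.getElem?_cons_zero, List.getElem?_cons_succ,
    Option.getD_some, Prod.mk.injEq, ← pconst_cast]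
  constructor <;> · push_cast [ZMod.intCast_mod]; ring

lemma mulZ_comm (a b : ZMod P × ZMod P) : mulZ a b = mulZ b a := by
  simp only [mulZ, Prod.mk.injEq]; constructor <;> ring

lemma mulZ_assoc (a b c : ZMod P × ZMod P) :
    mulZ (mulZ a b) c = mulZ a (mulZ b c) := by
  simp only [mulZ, Prod.mk.injEq]; constructor <;> ring

lemma mulZ_one (a : ZMod P × ZMod P) : mulZ a (1, 0) = a := by
  simp [mulZ]

lemma one_mulZ (a : ZMod P × ZMod P) : mulZ (1, 0) a = a := by
  rw [mulZ_comm]; exact mulZ_one a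

lemma gpw_succ' (k : Nat) (x : ZMod P × ZMod P) :
    mulZ x (gpw k x) = gpw (k + 1) x := by
  rw [gpw, mulZ_comm]

lemma gpw_add (a b : Nat) (x : ZMod P × ZMod P) :
    gpw (a + b) x = mulZ (gpw a x) (gpw b x) := by
  induction b with
  | zero => simp [gpw, mulZ_one]
  | succ b ih => rw [← Nat.add_assoc, gpw, gpw, ih, mulZ_assoc]

lemma gpw_sq (m : Nat) (x : ZMod P × ZMod P) :
    gpw m (mulZ x x) = gpw (2 * m) x := by
  induction m with
  | zero => rfl
  | succ m ih =>
      rw [gpw, ih, show 2 * (m + 1) = 2 * m + 2 from by ring, gpw_add]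
      congr 1
      simp [gpw, one_mulZ]

-- A's recursion computes the m-th power of (0,1)
lemma phi_FA (m : Nat) : phi (FA m) = gpw m (phi [0, 1]) := by
  induction m using Nat.strong_induction_on with
  | _ m ih =>
    rw [FA]
    by_cases h0 : m = 0
    · subst h0; simp; rfl
    · simp only [h0, if_false]
      by_cases h1 : m % 2 = 1
      · simp only [h1, if_true]
        rw [phi_mulM, ih (m - 1) (by omega)]
        rw [show m = (m - 1) + 1 from by omega, gpw]
        simp
      · simp only [h1, if_false]
        rw [phi_mulM, ih (m / 2) (by omega), ← gpw_add]
        congr 1; omega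

-- B's loop invariant: state (result, base) accumulates result · baseᵐ
lemma phi_FB (m : Nat) (r b : List Int) :
    phi (FB m r b) = mulZ (phi r) (gpw m (phi b)) := by
  induction m using Nat.strong_induction_on generalizing r b with
  | _ m ih =>
    rw [FB]
    by_cases h0 : m = 0
    · simp [h0, gpw, mulZ_one]
    · simp only [h0, if_false]
      rw [ih (m / 2) (by omega), phi_mulM, gpw_sq]
      by_cases h1 : m % 2 = 1
      · simp only [h1, if_true]
        rw [phi_mulM, mulZ_assoc]
        congr 1
        rw [gpw_succ']
        congr 1; omega
      · simp only [h1, if_false]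
        congr 1; · congr 1; omega

-- canonical form: both sides are two-element lists with entries in [0, p)
def Good (l : List Int) : Prop :=
  ∃ x y, l = [x, y] ∧ 0 ≤ x ∧ x < pconst ∧ 0 ≤ y ∧ y < pconst

lemma Good_mulM (a b : List Int) : Good (mulM a b) := by
  refine ⟨_, _, rfl, ?_, ?_, ?_, ?_⟩ <;>
    first
      | exact Int.emod_nonneg _ (by decide)
      | exact Int.emod_lt_of_pos _ (by decide)

lemma Good_one : Good [1, 0] := ⟨1, 0, rfl, by decide, by decide, by decide, by decide⟩

lemma Good_FA (m : Nat) : Good (FA m) := by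
  rw [FA]
  by_cases h0 : m = 0
  · simpa [h0] using Good_one
  · by_cases h1 : m % 2 = 1 <;> simp [h0, h1, Good_mulM]

lemma Good_FB (m : Nat) (r b : List Int) (hr : Good r) : Good (FB m r b) := by
  induction m using Nat.strong_induction_on generalizing r b with
  | _ m ih =>
    rw [FB]
    by_cases h0 : m = 0
    · simpa [h0]
    · simp only [h0, if_false]
      refine ih (m / 2) (by omega) _ _ ?_
      by_cases h1 : m % 2 = 1 <;> simp [h1, Good_mulM, hr]

lemma cast_inj_of_range {x y : Int} (hx0 : 0 ≤ x) (hx1 : x < pconst)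
    (hy0 : 0 ≤ y) (hy1 : y < pconst) (h : ((x : ZMod P)) = (y : ZMod P)) : x = y := by
  rw [ZMod.intCast_eq_intCast_iff'] at h
  rwa [pconst_cast, Int.emod_eq_of_lt hx0 hx1, Int.emod_eq_of_lt hy0 hy1] at h

lemma eq_of_phi_eq {l₁ l₂ : List Int} (h₁ : Good l₁) (h₂ : Good l₂)
    (h : phi l₁ = phi l₂) : l₁ = l₂ := by
  obtain ⟨x₁, y₁, rfl, hx₁0, hx₁1, hy₁0, hy₁1⟩ := h₁
  obtain ⟨x₂, y₂, rfl, hx₂0, hx₂1, hy₂0, hy₂1⟩ := h₂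
  simp only [phi, List.getD, Prod.mk.injEq] at h
  simp only [List.getElem?_cons_zero, List.getElem?_cons_succ, Option.getD_some] at h
  rw [cast_inj_of_range hx₁0 hx₁1 hx₂0 hx₂1 h.1,
      cast_inj_of_range hy₁0 hy₁1 hy₂0 hy₂1 h.2]

lemma FA_eq_FB (m : Nat) : FA m = FB m [1, 0] [0, 1] := by
  refine eq_of_phi_eq (Good_FA m) (Good_FB m _ _ Good_one) ?_
  rw [phi_FA, phi_FB, show phi [1, 0] = (1, 0) from rfl, one_mulZ]

-- ===== VERDICT (by name: the statement is the Claim_ definition above) =====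
theorem F_spec : Claim_equal_F := by
  intro n _ _
  show F n = F_alt n
  exact FA_eq_FB n.toNat
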